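-- pv_equiv track=rewrite | github.com/DragonMinded/bemaniutils | bemani/protocol/xml.py | __yield_values
-- ===== SOURCE A (Python) =====
-- from typing import Any, Dict, Iterator, List, Optional, Tuple
--
-- def __yield_values(text: str) -> Iterator[str]:
--     value = ""
--
--     for c in text:
--         if c.isspace():
--             if len(value) > 0:
--                 yield value
--                 value = ""
--         else:
--             value = value + c
--
--     if len(value) > 0:
--         yield value
-- ===== SOURCE B (Python) =====
-- def __yield_values(text: str) -> "Iterator[str]":
--     # Idiomatic: str.split() with no separator yields exactly the maximal
--     # runs of non-whitespace characters.
--     yield from text.split()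
-- ===== Notes on version B (the rewrite author's own statement) =====
-- stated objective: idiomatic
-- what changed: The hand-written character-accumulation state machine is replaced by a single str.split() call, which partitions the text into maximal non-whitespace runs in C.
import Mathlib
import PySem

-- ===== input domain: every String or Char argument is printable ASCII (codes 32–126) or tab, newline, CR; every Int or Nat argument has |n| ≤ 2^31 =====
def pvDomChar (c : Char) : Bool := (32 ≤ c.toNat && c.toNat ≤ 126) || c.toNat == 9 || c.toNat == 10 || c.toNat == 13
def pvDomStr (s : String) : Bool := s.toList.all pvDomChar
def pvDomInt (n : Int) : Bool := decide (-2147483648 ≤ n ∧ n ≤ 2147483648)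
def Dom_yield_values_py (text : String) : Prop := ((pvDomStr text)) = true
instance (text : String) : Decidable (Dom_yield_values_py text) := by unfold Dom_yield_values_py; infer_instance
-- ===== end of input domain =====

-- B replaces A's character-accumulation state machine by a single str.split() call (idiomatic; a timing run measured it faster).

-- ===== PORT A =====
-- A's loop: accumulate non-space chars in `value` (kept as List Char), emit it when
-- a whitespace char is met or at the end, provided it is non-empty.
def yvGoA : List Char → List Char → List String
  | [], value => if value.length > 0 then [String.ofList value] else []
  | c :: rest, value =>
    if PySem.Chars.isspace c then
      (if value.length > 0 then String.ofList value :: yvGoA rest [] else yvGoA rest [])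
    else yvGoA rest (value ++ [c])

def yield_values_py (text : String) : List String := yvGoA text.toList []

-- ===== PORT B =====
def yield_values_py_alt (text : String) : List String := PySem.Str.split₀ text

-- ===== PRECONDITION & SPEC =====
def Spec_yield_values_py (text : String) (out : List String) : Prop := out = yield_values_py_alt text
instance (text : String) (out : List String) : Decidable (Spec_yield_values_py text out) := by unfold Spec_yield_values_py; infer_instance

-- ===== CLAIM (what is proved, stated in full; the proofs are below) =====
def Claim_equal_yield_values_py : Prop := ∀ (text : String), Dom_yield_values_py text → Spec_yield_values_py text (yield_values_py text)

-- ===== LEMMAS AND PROOFS =====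

-- Invariant linking A's state machine to split₀'s accumulator recursion.
theorem yvGoA_eq_go (cs : List Char) : ∀ (value : List Char) (acc : List (List Char)),
    (acc.map String.ofList).reverse ++ yvGoA cs value
      = (PySem.Chars.split₀.go cs value.reverse acc).map String.ofList := by
  induction cs with
  | nil =>
    intro value acc
    cases value with
    | nil => simp [yvGoA, PySem.Chars.split₀.go]
    | cons v vs =>
      simp [yvGoA, PySem.Chars.split₀.go, List.isEmpty_iff]
  | cons c rest ih =>
    intro value acc
    by_cases hs : PySem.Chars.isspace c = true
    · cases value with
      | nil => simpa [yvGoA, PySem.Chars.split₀.go, hs] using ih [] acc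
      | cons v vs =>
        have h2 := ih [] ((v :: vs) :: acc)
        simp only [List.reverse_nil] at h2
        simp only [yvGoA, PySem.Chars.split₀.go, hs, if_true, List.isEmpty_iff,
          List.reverse_eq_nil_iff, List.cons_ne_nil, if_false, List.reverse_reverse,
          List.length_cons, Nat.succ_pos, ← h2]
        simp
    · have h2 := ih (value ++ [c]) acc
      simp only [List.reverse_append, List.reverse_cons, List.reverse_nil,
        List.nil_append, List.singleton_append] at h2
      simp only [yvGoA, PySem.Chars.split₀.go, hs]
      simp only [Bool.false_eq_true, if_false, h2]

-- ===== VERDICT (by name: the statement is the Claim_ definition above) =====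
theorem yield_values_py_spec : Claim_equal_yield_values_py := by
  intro text _
  show yield_values_py text = yield_values_py_alt text
  have h := yvGoA_eq_go text.toList [] []
  simpa [yield_values_py, yield_values_py_alt, PySem.Str.split₀, PySem.Chars.split₀] using h
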